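-- pv_equiv track=rewrite | github.com/R8Zorg/AaDS | labs/lab_12/main.py | find_accessible_exit
-- ===== SOURCE A (Python) =====
-- def find_accessible_exit(maze, start: tuple[int, int]):
--     exits = []
--     width, height = len(maze[0]), len(maze)
--
--     exit_candidates: list[tuple[int, int]] = []
--     for x in range(width):
--         if maze[0][x] == 0:
--             exit_candidates.append((x, 0))
--         if maze[height - 1][x] == 0:
--             exit_candidates.append((x, height - 1))
--     for y in range(height):
--         if maze[y][0] == 0:
--             exit_candidates.append((0, y))
--         if maze[y][width - 1] == 0:
--             exit_candidates.append((width - 1, y))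
--
--     for exit_pos in exit_candidates:
--         path = dfs(maze, start, exit_pos)
--         if path:
--             exits.append(exit_pos)
--
--     return exits
--
-- def dfs(maze, start: tuple[int, int], exit: tuple[int, int]) -> list[tuple[int, int]]:
--     stack = [(start, [start])]
--     visited = set()
--
--     while stack:
--         (x, y), path = stack.pop()
--         if (x, y) == exit:
--             return path
--         if (x, y) in visited:
--             continue
--         visited.add((x, y))
--         left, right, up, down = (-1, 0), (1, 0), (0, -1), (0, 1)
--         for x_move, y_move in [left, right, up, down]:
--             next_x, next_y = x + x_move, y + y_move
--             if (
--                 0 <= next_y < len(maze)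
--                 and 0 <= next_x < len(maze[0])
--                 and maze[next_y][next_x] != 1
--             ):
--                 stack.append(((next_x, next_y), path + [(next_x, next_y)]))
--     return []
-- ===== SOURCE B (Python) =====
-- def find_accessible_exit(maze, start):
--     height, width = len(maze), len(maze[0])
--
--     def open_cell(x, y):
--         return 0 <= y < height and 0 <= x < width and maze[y][x] != 1
--
--     # round-based saturation: repeatedly sweep the current reachable list,
--     # adding every legal unvisited neighbour, until a whole sweep adds nothing
--     reachable = [start]
--     changed = True
--     while changed:
--         changed = False
--         for x, y in list(reachable):
--             for nxt in ((x - 1, y), (x + 1, y), (x, y - 1), (x, y + 1)):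
--                 if open_cell(nxt[0], nxt[1]) and nxt not in reachable:
--                     reachable.append(nxt)
--                     changed = True
--
--     candidates = [(x, y) for x in range(width) for y in (0, height - 1)] \
--                + [(x, y) for y in range(height) for x in (0, width - 1)]
--     return [p for p in candidates if maze[p[1]][p[0]] == 0 and p in reachable]
-- ===== Notes on version B (the rewrite author's own statement) =====
-- stated objective: alternative
-- what changed: Instead of running a fresh path-copying DFS from start towards every border candidate built by conditional appends, B computes the reachable set once by round-based fixed-point saturation and then filters a comprehension-built unconditional border-candidate list by openness and membership.
import Mathlib
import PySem

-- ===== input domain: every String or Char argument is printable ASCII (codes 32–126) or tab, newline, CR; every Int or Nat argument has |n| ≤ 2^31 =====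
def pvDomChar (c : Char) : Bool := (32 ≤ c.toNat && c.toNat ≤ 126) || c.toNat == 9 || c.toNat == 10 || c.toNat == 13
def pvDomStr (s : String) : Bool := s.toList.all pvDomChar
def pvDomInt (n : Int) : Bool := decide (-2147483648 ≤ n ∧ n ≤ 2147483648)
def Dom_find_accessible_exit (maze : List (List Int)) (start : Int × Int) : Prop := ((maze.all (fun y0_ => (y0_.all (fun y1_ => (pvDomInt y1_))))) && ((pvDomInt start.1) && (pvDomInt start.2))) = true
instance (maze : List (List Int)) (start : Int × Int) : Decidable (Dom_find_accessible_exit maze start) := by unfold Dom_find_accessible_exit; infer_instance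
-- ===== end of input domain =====

-- B replaces A's per-candidate path-copying DFS by one round-based fixed-point
-- saturation of the reachable set plus a filtered comprehension-built border
-- candidate list (objective: alternative).

-- ===== PORT A =====
-- A-side geometry helpers
def pvNbrs (c : Int × Int) : List (Int × Int) :=
  [(c.1 - 1, c.2), (c.1 + 1, c.2), (c.1, c.2 - 1), (c.1, c.2 + 1)]

-- maze[c.2][c.1] via total pyGetD: exact under Pre_ (both indices are bound-checked before use)
def pvAt (maze : List (List Int)) (c : Int × Int) : Int :=
  PySem.List.pyGetD (PySem.List.pyGetD maze c.2 []) c.1 0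

-- the move test of A's dfs: in bounds and not a wall
def pvOk (maze : List (List Int)) (c : Int × Int) : Bool :=
  decide (0 ≤ c.2) && decide (c.2 < (maze.length : Int)) &&
  decide (0 ≤ c.1) && decide (c.1 < ((PySem.List.pyGetD maze 0 []).length : Int)) &&
  decide (pvAt maze c ≠ 1)

-- all in-bounds cells; used only as the finite universe of the termination measures
def pvCells (maze : List (List Int)) : List (Int × Int) :=
  (List.range maze.length).flatMap (fun y =>
    (List.range (PySem.List.pyGetD maze 0 []).length).map (fun x => ((x : Int), (y : Int))))

-- termination helper: adding a fresh element of l to the visited set shrinks the unvisited count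
theorem pvCountP_lt {α : Type} (p q : α → Bool) (l : List α)
    (hpq : ∀ x, q x = true → p x = true) (c : α) (hc : c ∈ l)
    (hpc : p c = true) (hqc : q c = false) : l.countP q < l.countP p := by
  induction l with
  | nil => simp at hc
  | cons a l ih =>
    simp only [List.countP_cons]
    rcases List.mem_cons.1 hc with rfl | hmem
    · have hle : l.countP q ≤ l.countP p := List.countP_mono_left (fun x _ hx => hpq x hx)
      simp [hpc, hqc]
      omega
    · have h1 := ih hmem
      have h2 := hpq a
      cases hq : q a <;> cases hp : p a <;> simp_all <;> omega

theorem pvOk_mem_cells (maze : List (List Int)) (c : Int × Int)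
    (h : pvOk maze c = true) : c ∈ pvCells maze := by
  obtain ⟨cx, cy⟩ := c
  simp only [pvOk, Bool.and_eq_true, decide_eq_true_eq] at h
  obtain ⟨⟨⟨⟨h1, h2⟩, h3⟩, h4⟩, -⟩ := h
  simp only [pvCells, List.mem_flatMap, List.mem_map]
  refine ⟨cy, ?_, cx, ?_, rfl⟩
  · simp
    exact ⟨cy.toNat, by omega, by omega⟩
  · simp
    exact ⟨cx.toNat, by omega, by omega⟩

-- membership in the stack after A's push loop (cited by dfsLoop's ghost proof and by the proofs below)
theorem pv_mem_pushfold (maze : List (List Int)) (path : List (Int × Int)) :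
    ∀ (ns : List (Int × Int)) (rest : List ((Int × Int) × List (Int × Int)))
      (p : (Int × Int) × List (Int × Int)),
      p ∈ ns.foldl (fun st n => if pvOk maze n then (n, path ++ [n]) :: st else st) rest ↔
        (∃ n, n ∈ ns ∧ pvOk maze n = true ∧ p = (n, path ++ [n])) ∨ p ∈ rest := by
  intro ns
  induction ns with
  | nil => intro rest p; simp
  | cons a ns ih =>
    intro rest p
    simp only [List.foldl_cons]
    cases ha : pvOk maze a
    · rw [if_neg (by simp [ha]), ih]
      constructor
      · rintro (⟨n, hn, hok, rfl⟩ | hp)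
        · exact Or.inl ⟨n, List.mem_cons_of_mem _ hn, hok, rfl⟩
        · exact Or.inr hp
      · rintro (⟨n, hn, hok, rfl⟩ | hp)
        · rcases List.mem_cons.1 hn with rfl | hn'
          · rw [ha] at hok; cases hok
          · exact Or.inl ⟨n, hn', hok, rfl⟩
        · exact Or.inr hp
    · rw [if_pos (by simp [ha]), ih]
      constructor
      · rintro (⟨n, hn, hok, rfl⟩ | hp)
        · exact Or.inl ⟨n, List.mem_cons_of_mem _ hn, hok, rfl⟩
        · rcases List.mem_cons.1 hp with rfl | hp'
          · exact Or.inl ⟨a, List.mem_cons_self, ha, rfl⟩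
          · exact Or.inr hp'
      · rintro (⟨n, hn, hok, rfl⟩ | hp)
        · rcases List.mem_cons.1 hn with rfl | hn'
          · exact Or.inr List.mem_cons_self
          · exact Or.inl ⟨n, hn', hok, rfl⟩
        · exact Or.inr (List.mem_cons_of_mem _ hp)

-- the while-loop of A's dfs; stack head = Python stack top; U/hU/hs are ghost
-- (proof-only) arguments giving the finite universe the termination measure lives in
def dfsLoop (maze : List (List Int)) (exitc : Int × Int) (U : List (Int × Int))
    (hU : ∀ n, pvOk maze n = true → n ∈ U)
    (stack : List ((Int × Int) × List (Int × Int))) (visited : List (Int × Int))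
    (hs : ∀ p ∈ stack, p.1 ∈ U) : List (Int × Int) :=
  match stack with
  | [] => []
  | (c, path) :: rest =>
    if c = exitc then path
    else if hv : visited.contains c then
      dfsLoop maze exitc U hU rest visited (fun p hp => hs p (List.mem_cons_of_mem _ hp))
    else
      dfsLoop maze exitc U hU
        ((pvNbrs c).foldl (fun st n => if pvOk maze n then (n, path ++ [n]) :: st else st) rest)
        (visited ++ [c])
        (by
          intro p hp
          rcases (pv_mem_pushfold maze path (pvNbrs c) rest p).1 hp with ⟨n, _, hok, rfl⟩ | hp'
          · exact hU n hok
          · exact hs p (List.mem_cons_of_mem _ hp'))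
termination_by ((U.filter (fun a => !(visited.contains a))).length, stack.length)
decreasing_by
  · apply Prod.Lex.right; simp
  · apply Prod.Lex.left
    simp only [← List.countP_eq_length_filter]
    refine pvCountP_lt _ _ U ?_ c (hs (c, path) List.mem_cons_self) ?_ ?_
    · intro x hx
      simp only [Bool.not_eq_true', List.contains_eq_mem, decide_eq_false_iff_not,
        List.mem_append, List.mem_cons] at hx ⊢
      tauto
    · simp only [Bool.not_eq_true', List.contains_eq_mem, decide_eq_false_iff_not]
      intro hmem
      exact hv (by simpa [List.contains_eq_mem] using hmem)
    · simp [List.contains_eq_mem]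

def pvDfs (maze : List (List Int)) (start exitc : Int × Int) : List (Int × Int) :=
  dfsLoop maze exitc (start :: pvCells maze)
    (fun n hn => List.mem_cons_of_mem _ (pvOk_mem_cells maze n hn))
    [(start, [start])] []
    (by intro p hp; simp only [List.mem_singleton] at hp; subst hp; exact List.mem_cons_self)

def find_accessible_exit (maze : List (List Int)) (start : Int × Int) : List (Int × Int) :=
  let width : Int := ((PySem.List.pyGetD maze 0 []).length : Int)
  let height : Int := (maze.length : Int)
  let cand1 := (PySem.List.pyRange 0 width 1).foldl (fun acc x =>
      let acc := if pvAt maze (x, 0) == 0 then acc ++ [(x, (0 : Int))] else acc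
      if pvAt maze (x, height - 1) == 0 then acc ++ [(x, height - 1)] else acc) []
  let cand := (PySem.List.pyRange 0 height 1).foldl (fun acc y =>
      let acc := if pvAt maze ((0 : Int), y) == 0 then acc ++ [((0 : Int), y)] else acc
      if pvAt maze (width - 1, y) == 0 then acc ++ [(width - 1, y)] else acc) cand1
  cand.foldl (fun acc e => if pvDfs maze start e ≠ [] then acc ++ [e] else acc) []

-- ===== PORT B =====
-- B's open_cell(x, y) helper: in bounds and not a wall
def bOpen (maze : List (List Int)) (x y : Int) : Bool :=
  decide (0 ≤ y ∧ y < (maze.length : Int) ∧ 0 ≤ x ∧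
    x < ((PySem.List.pyGetD maze 0 []).length : Int) ∧
    PySem.List.pyGetD (PySem.List.pyGetD maze y []) x 0 ≠ 1)

-- B's innermost step: append the neighbour if it is open and not yet reached
def satAdd (maze : List (List Int)) (a : List (Int × Int)) (n : Int × Int) :
    List (Int × Int) :=
  if bOpen maze n.1 n.2 && !(a.contains n) then a ++ [n] else a

-- one cell of B's sweep: try the four neighbours of c
def satVisit (maze : List (List Int)) (acc : List (Int × Int)) (c : Int × Int) :
    List (Int × Int) :=
  [(c.1 - 1, c.2), (c.1 + 1, c.2), (c.1, c.2 - 1), (c.1, c.2 + 1)].foldl (satAdd maze) acc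

-- one whole sweep over the snapshot list(reachable)
def satRound (maze : List (List Int)) (reach : List (Int × Int)) : List (Int × Int) :=
  reach.foldl (satVisit maze) reach

-- bOpen is A's move test (cited below and by satLoop's termination proof)
theorem bOpen_eq_pvOk (maze : List (List Int)) (c : Int × Int) :
    bOpen maze c.1 c.2 = pvOk maze c := by
  simp only [bOpen, pvOk, pvAt]
  rw [Bool.eq_iff_iff]
  simp [and_assoc]

-- what one inner neighbour fold does (cited by the round spec)
theorem satAdd_fold_spec (maze : List (List Int)) :
    ∀ (ns acc : List (Int × Int)),
      ∃ ex, ns.foldl (satAdd maze) acc = acc ++ ex ∧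
        (∀ n ∈ ex, n ∈ ns ∧ pvOk maze n = true ∧ ¬ n ∈ acc) ∧
        (∀ n ∈ ns, pvOk maze n = true → n ∈ acc ++ ex) := by
  intro ns
  induction ns with
  | nil => intro acc; exact ⟨[], by simp, by simp, by simp⟩
  | cons a ns ih =>
    intro acc
    simp only [List.foldl_cons]
    by_cases hc : pvOk maze a = true ∧ ¬ a ∈ acc
    · rw [show satAdd maze acc a = acc ++ [a] from by
        simp [satAdd, bOpen_eq_pvOk, hc.1, List.contains_eq_mem, hc.2]]
      obtain ⟨ex, h1, h2, h3⟩ := ih (acc ++ [a])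
      refine ⟨a :: ex, by simpa using h1, ?_, ?_⟩
      · intro n hn
        rcases List.mem_cons.1 hn with rfl | hn'
        · exact ⟨List.mem_cons_self, hc.1, hc.2⟩
        · obtain ⟨hns, hok, hnr⟩ := h2 n hn'
          exact ⟨List.mem_cons_of_mem _ hns, hok, fun hmem => hnr (by simp [hmem])⟩
      · intro n hn
        rcases List.mem_cons.1 hn with rfl | hn'
        · intro _; simp
        · intro hok
          have := h3 n hn' hok
          simp only [List.mem_append, List.mem_cons, List.mem_singleton] at this ⊢
          tauto
    · rw [show satAdd maze acc a = acc from by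
        rcases Decidable.not_and_iff_not_or_not.1 hc with h | h
        · simp [satAdd, bOpen_eq_pvOk, Bool.eq_false_iff.2 h]
        · simp only [Decidable.not_not] at h
          simp [satAdd, List.contains_eq_mem, h]]
      obtain ⟨ex, h1, h2, h3⟩ := ih acc
      refine ⟨ex, h1, fun n hn => ?_, fun n hn => ?_⟩
      · obtain ⟨x, y, z⟩ := h2 n hn
        exact ⟨List.mem_cons_of_mem _ x, y, z⟩
      · rcases List.mem_cons.1 hn with rfl | hn'
        · intro hok
          rcases Decidable.not_and_iff_not_or_not.1 hc with h | h
          · exact absurd hok h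
          · simp only [Decidable.not_not] at h
            exact List.mem_append_left _ h
        · exact h3 n hn'

-- what one whole sweep does (cited by satLoop's termination proof and the proofs below)
theorem satRound_fold_spec (maze : List (List Int)) :
    ∀ (cells acc : List (Int × Int)),
      ∃ ex, cells.foldl (satVisit maze) acc = acc ++ ex ∧
        (∀ n ∈ ex, pvOk maze n = true ∧ ¬ n ∈ acc ∧ ∃ c ∈ cells, n ∈ pvNbrs c) ∧
        (∀ c ∈ cells, ∀ n ∈ pvNbrs c, pvOk maze n = true → n ∈ acc ++ ex) := by
  intro cells
  induction cells with
  | nil => intro acc; exact ⟨[], by simp, by simp, by simp⟩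
  | cons c cells ih =>
    intro acc
    simp only [List.foldl_cons]
    obtain ⟨ex1, h1, h2, h3⟩ := satAdd_fold_spec maze (pvNbrs c) acc
    have hvisit : satVisit maze acc c = acc ++ ex1 := h1
    rw [hvisit]
    obtain ⟨ex2, g1, g2, g3⟩ := ih (acc ++ ex1)
    refine ⟨ex1 ++ ex2, by rw [g1, List.append_assoc], ?_, ?_⟩
    · intro n hn
      rcases List.mem_append.1 hn with hn1 | hn2
      · obtain ⟨hns, hok, hna⟩ := h2 n hn1
        exact ⟨hok, hna, c, List.mem_cons_self, hns⟩
      · obtain ⟨hok, hna, c', hc', hns⟩ := g2 n hn2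
        exact ⟨hok, fun hm => hna (List.mem_append_left _ hm),
          c', List.mem_cons_of_mem _ hc', hns⟩
    · intro c' hc' n hn hok
      rcases List.mem_cons.1 hc' with rfl | hc''
      · have := h3 n hn hok
        simp only [List.mem_append] at this ⊢
        tauto
      · have := g3 c' hc'' n hn hok
        simp only [List.mem_append] at this ⊢
        tauto

-- B's while-changed loop: sweep, and repeat as long as the sweep added something
def satLoop (maze : List (List Int)) (reach : List (Int × Int)) : List (Int × Int) :=
  if satRound maze reach = reach then reach
  else satLoop maze (satRound maze reach)
termination_by ((pvCells maze).filter (fun a => !(reach.contains a))).length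
decreasing_by
  rename_i hne
  obtain ⟨ex, hr, hex, -⟩ := satRound_fold_spec maze reach reach
  have hr' : satRound maze reach = reach ++ ex := hr
  rcases ex with _ | ⟨e, ex'⟩
  · exact absurd (by simpa using hr') hne
  · simp only [← List.countP_eq_length_filter]
    obtain ⟨he_ok, he_new, -⟩ := hex e List.mem_cons_self
    refine pvCountP_lt _ _ (pvCells maze) ?_ e (pvOk_mem_cells maze e he_ok) ?_ ?_
    · intro x hx
      simp only [Bool.not_eq_true', List.contains_eq_mem, decide_eq_false_iff_not, hr',
        List.mem_append] at hx ⊢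
      tauto
    · simpa [List.contains_eq_mem] using he_new
    · simp [List.contains_eq_mem, hr']

def find_accessible_exit_alt (maze : List (List Int)) (start : Int × Int) :
    List (Int × Int) :=
  let height : Int := (maze.length : Int)
  let width : Int := ((PySem.List.pyGetD maze 0 []).length : Int)
  let reachable := satLoop maze [start]
  let candidates :=
    (PySem.List.pyRange 0 width 1).flatMap (fun x => [(x, (0 : Int)), (x, height - 1)]) ++
    (PySem.List.pyRange 0 height 1).flatMap (fun y => [((0 : Int), y), (width - 1, y)])
  candidates.filter (fun p =>
    PySem.List.pyGetD (PySem.List.pyGetD maze p.2 []) p.1 0 == 0 && reachable.contains p)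

-- ===== PRECONDITION & SPEC =====
-- Pre_ excludes exactly the inputs on which Python A raises IndexError:
-- an empty maze, an empty first row, or any row shorter than the first row.
def Pre_find_accessible_exit (maze : List (List Int)) (start : Int × Int) : Prop :=
  maze ≠ [] ∧ 0 < (PySem.List.pyGetD maze 0 []).length ∧
    ∀ row ∈ maze, (PySem.List.pyGetD maze 0 []).length ≤ row.length
instance (maze : List (List Int)) (start : Int × Int) : Decidable (Pre_find_accessible_exit maze start) := by unfold Pre_find_accessible_exit; infer_instance

def pvWitness_find_accessible_exit : List (List Int) × (Int × Int) := ([[0, 1], [0, 0]], (1, 1))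

def Spec_find_accessible_exit (maze : List (List Int)) (start : Int × Int) (out : List (Int × Int)) : Prop := out = find_accessible_exit_alt maze start
instance (maze : List (List Int)) (start : Int × Int) (out : List (Int × Int)) : Decidable (Spec_find_accessible_exit maze start out) := by unfold Spec_find_accessible_exit; infer_instance

-- ===== CLAIM (what is proved, stated in full; the proofs are below) =====
def Claim_equal_find_accessible_exit : Prop := ∀ (maze : List (List Int)) (start : Int × Int), Dom_find_accessible_exit maze start → Pre_find_accessible_exit maze start → Spec_find_accessible_exit maze start (find_accessible_exit maze start)

-- ===== LEMMAS AND PROOFS =====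

-- the cells reachable from start: start itself, plus closure under legal moves
inductive pvReach (maze : List (List Int)) (start : Int × Int) : Int × Int → Prop where
  | base : pvReach maze start start
  | step {c n : Int × Int} : pvReach maze start c → n ∈ pvNbrs c → pvOk maze n = true →
      pvReach maze start n

theorem pvReach_mem_closed (maze : List (List Int)) (start : Int × Int)
    (V : Int × Int → Prop) (hs : V start)
    (hc : ∀ c, V c → ∀ n ∈ pvNbrs c, pvOk maze n = true → V n) :
    ∀ r, pvReach maze start r → V r := by
  intro r h
  induction h with
  | base => exact hs
  | step hr hn hok ih => exact hc _ ih _ hn hok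

theorem dfsLoop_sound (maze : List (List Int)) (start exitc : Int × Int)
    (U : List (Int × Int)) (hU : ∀ n, pvOk maze n = true → n ∈ U) :
    ∀ (stack : List ((Int × Int) × List (Int × Int))) (visited : List (Int × Int))
      (hs : ∀ p ∈ stack, p.1 ∈ U),
      (∀ p ∈ stack, pvReach maze start p.1) →
      dfsLoop maze exitc U hU stack visited hs ≠ [] → pvReach maze start exitc := by
  intro stack visited hs
  fun_induction dfsLoop maze exitc U hU stack visited hs with
  | case1 => intro _ h; exact absurd rfl h
  | case2 visited path rest hs1 hs2 =>
    intro hr _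
    exact hr (exitc, path) List.mem_cons_self
  | case3 visited c path rest hs1 hcne hv hs2 ih =>
    intro hr hne
    exact ih (fun p hp => hr p (List.mem_cons_of_mem _ hp)) hne
  | case4 visited c path rest hs1 hcne hv hs2 ih =>
    intro hr hne
    refine ih ?_ hne
    intro p hp
    have hp2 := (pv_mem_pushfold maze path (pvNbrs c) rest p).1 (by exact hp)
    rcases hp2 with ⟨n, hn, hok, rfl⟩ | hp'
    · exact pvReach.step (hr (c, path) List.mem_cons_self) hn hok
    · exact hr p (List.mem_cons_of_mem _ hp')

theorem dfsLoop_complete (maze : List (List Int)) (exitc : Int × Int)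
    (U : List (Int × Int)) (hU : ∀ n, pvOk maze n = true → n ∈ U) :
    ∀ (stack : List ((Int × Int) × List (Int × Int))) (visited : List (Int × Int))
      (hs : ∀ p ∈ stack, p.1 ∈ U),
      (∀ p ∈ stack, p.2 ≠ []) →
      (¬ exitc ∈ visited) →
      (∀ v ∈ visited, ∀ n ∈ pvNbrs v, pvOk maze n = true →
        n ∈ visited ∨ n ∈ stack.map Prod.fst) →
      dfsLoop maze exitc U hU stack visited hs = [] →
      ∃ V : Int × Int → Prop, (∀ v ∈ visited, V v) ∧ (∀ p ∈ stack, V p.1) ∧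
        (∀ c, V c → ∀ n ∈ pvNbrs c, pvOk maze n = true → V n) ∧ ¬ V exitc := by
  intro stack visited hs
  fun_induction dfsLoop maze exitc U hU stack visited hs with
  | case1 visited hs1 hs2 =>
    intro _ hI1 hI2 _
    refine ⟨fun v => v ∈ visited, fun v hv => hv, by simp, ?_, hI1⟩
    intro c hc n hn hok
    rcases hI2 c hc n hn hok with h | h
    · exact h
    · simp at h
  | case2 visited path rest hs1 hs2 =>
    intro hI0 _ _ hemp
    exact absurd hemp (hI0 (exitc, path) List.mem_cons_self)
  | case3 visited c path rest hs1 hcne hv hs2 ih =>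
    intro hI0 hI1 hI2 hemp
    have hcv : c ∈ visited := by simpa [List.contains_eq_mem] using hv
    obtain ⟨V, hv1, hv2, hcl, hVne⟩ := ih
      (fun p hp => hI0 p (List.mem_cons_of_mem _ hp)) hI1
      (by
        intro v hvv n hn hok
        rcases hI2 v hvv n hn hok with h | h
        · exact Or.inl h
        · simp only [List.map_cons, List.mem_cons] at h
          rcases h with rfl | h'
          · exact Or.inl hcv
          · exact Or.inr h')
      hemp
    refine ⟨V, hv1, ?_, hcl, hVne⟩
    intro p hp
    rcases List.mem_cons.1 hp with rfl | hp'
    · exact hv1 _ hcv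
    · exact hv2 p hp'
  | case4 visited c path rest hs1 hcne hv hs2 ih =>
    intro hI0 hI1 hI2 hemp
    have hpush := pv_mem_pushfold maze path (pvNbrs c) rest
    obtain ⟨V, hv1, hv2, hcl, hVne⟩ := ih
      (by
        intro p hp
        rcases (hpush p).1 (by exact hp) with ⟨n, hn, hok, rfl⟩ | hp'
        · simp
        · exact hI0 p (List.mem_cons_of_mem _ hp'))
      (by
        intro hmem
        rcases List.mem_append.1 hmem with h | h
        · exact hI1 h
        · simp only [List.mem_singleton] at h
          exact hcne h.symm)
      (by
        intro v hvv n hn hok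
        rcases List.mem_append.1 hvv with hvv' | hvc
        · rcases hI2 v hvv' n hn hok with h | h
          · exact Or.inl (List.mem_append_left _ h)
          · simp only [List.map_cons, List.mem_cons] at h
            rcases h with rfl | h'
            · exact Or.inl (by simp)
            · refine Or.inr ?_
              rcases List.mem_map.1 h' with ⟨p, hp, rfl⟩
              exact List.mem_map_of_mem ((hpush p).2 (Or.inr hp))
        · simp only [List.mem_singleton] at hvc
          subst hvc
          refine Or.inr ?_
          exact List.mem_map_of_mem ((hpush (n, path ++ [n])).2 (Or.inl ⟨n, hn, hok, rfl⟩))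
      )
      hemp
    refine ⟨V, ?_, ?_, hcl, hVne⟩
    · exact fun v hvv => hv1 v (List.mem_append_left _ hvv)
    · intro p hp
      rcases List.mem_cons.1 hp with rfl | hp'
      · exact hv1 _ (by simp)
      · exact hv2 p ((hpush p).2 (Or.inr hp'))

theorem pvDfs_ne_iff (maze : List (List Int)) (start exitc : Int × Int) :
    pvDfs maze start exitc ≠ [] ↔ pvReach maze start exitc := by
  constructor
  · intro hne
    refine dfsLoop_sound maze start exitc _ _ _ _ _ ?_ hne
    intro p hp
    simp only [List.mem_singleton] at hp
    subst hp
    exact pvReach.base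
  · intro hr hemp
    obtain ⟨V, hv1, hv2, hcl, hVne⟩ := dfsLoop_complete maze exitc _ _ _ _ _
      (by intro p hp; simp only [List.mem_singleton] at hp; subst hp; simp)
      (by simp)
      (by simp)
      hemp
    exact hVne (pvReach_mem_closed maze start V
      (hv2 (start, [start]) List.mem_cons_self) hcl exitc hr)

-- B's saturation only grows the reachable list
theorem satLoop_mono (maze : List (List Int)) :
    ∀ (reach : List (Int × Int)) (x : Int × Int), x ∈ reach → x ∈ satLoop maze reach := by
  intro reach
  fun_induction satLoop maze reach with
  | case1 reach heq => exact fun x hx => hx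
  | case2 reach hne ih =>
    intro x hx
    obtain ⟨ex, hr, -, -⟩ := satRound_fold_spec maze reach reach
    refine ih x ?_
    rw [show satRound maze reach = reach ++ ex from hr]
    exact List.mem_append_left _ hx

-- everything B's saturation collects is reachable from start
theorem satLoop_sound (maze : List (List Int)) (start : Int × Int) :
    ∀ (reach : List (Int × Int)),
      (∀ x ∈ reach, pvReach maze start x) →
      ∀ x ∈ satLoop maze reach, pvReach maze start x := by
  intro reach
  fun_induction satLoop maze reach with
  | case1 reach heq => exact fun h => h
  | case2 reach hne ih =>
    intro hR
    refine ih ?_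
    obtain ⟨ex, hr, hex, -⟩ := satRound_fold_spec maze reach reach
    rw [show satRound maze reach = reach ++ ex from hr]
    intro x hx
    rcases List.mem_append.1 hx with h | h
    · exact hR x h
    · obtain ⟨hok, -, c, hc, hn⟩ := hex x h
      exact pvReach.step (hR c hc) hn hok

-- B's saturation result is closed under legal moves
theorem satLoop_closed (maze : List (List Int)) :
    ∀ (reach : List (Int × Int)),
      ∀ v ∈ satLoop maze reach, ∀ n ∈ pvNbrs v, pvOk maze n = true →
        n ∈ satLoop maze reach := by
  intro reach
  fun_induction satLoop maze reach with
  | case1 reach heq =>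
    intro v hv n hn hok
    obtain ⟨ex, hr, -, hcls⟩ := satRound_fold_spec maze reach reach
    have hex0 : ex = [] := by
      have := hr.symm.trans heq
      simpa using this
    have := hcls v hv n hn hok
    rw [hex0] at this
    simpa using this
  | case2 reach hne ih => exact ih

theorem mem_sat_iff (maze : List (List Int)) (start e : Int × Int) :
    e ∈ satLoop maze [start] ↔ pvReach maze start e := by
  constructor
  · intro he
    refine satLoop_sound maze start [start] ?_ e he
    intro x hx
    simp only [List.mem_singleton] at hx
    subst hx
    exact pvReach.base
  · intro hr
    refine pvReach_mem_closed maze start (fun r => r ∈ satLoop maze [start]) ?_ ?_ e hr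
    · exact satLoop_mono maze [start] start List.mem_cons_self
    · exact fun c hc n hn hok => satLoop_closed maze [start] c hc n hn hok

-- a conjunctive filter is two filters in sequence
theorem pv_filter_and {α : Type} (f g : α → Bool) :
    ∀ l : List α, l.filter (fun a => f a && g a) = (l.filter f).filter g := by
  intro l
  induction l with
  | nil => rfl
  | cons a l ih =>
    by_cases hf : f a = true <;> by_cases hg : g a = true <;>
      simp [List.filter_cons, hf, hg, ih]

-- A's double-conditional-append fold builds the filtered flat pair list
theorem pv_fold2_flat {β : Type} (p : Int × Int → Bool) (g1 g2 : β → Int × Int) :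
    ∀ (l : List β) (acc : List (Int × Int)),
      l.foldl (fun acc x =>
        let a := if p (g1 x) then acc ++ [g1 x] else acc
        if p (g2 x) then a ++ [g2 x] else a) acc
      = acc ++ (l.flatMap (fun x => [g1 x, g2 x])).filter p := by
  intro l
  induction l with
  | nil => intro acc; simp
  | cons x l ih =>
    intro acc
    simp only [List.foldl_cons]
    rw [ih]
    cases h1 : p (g1 x) <;> cases h2 : p (g2 x) <;>
      simp [h1, h2, List.filter_cons, List.append_assoc]

-- proof-only names for A's candidate-building folds
def pvCandX (maze : List (List Int)) : List (Int × Int) :=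
  (PySem.List.pyRange 0 ((PySem.List.pyGetD maze 0 []).length : Int) 1).foldl (fun acc x =>
      let acc := if pvAt maze (x, 0) == 0 then acc ++ [(x, (0 : Int))] else acc
      if pvAt maze (x, (maze.length : Int) - 1) == 0 then acc ++ [(x, (maze.length : Int) - 1)]
      else acc) []

def pvCand (maze : List (List Int)) : List (Int × Int) :=
  (PySem.List.pyRange 0 (maze.length : Int) 1).foldl (fun acc y =>
      let acc := if pvAt maze ((0 : Int), y) == 0 then acc ++ [((0 : Int), y)] else acc
      if pvAt maze (((PySem.List.pyGetD maze 0 []).length : Int) - 1, y) == 0 then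
        acc ++ [(((PySem.List.pyGetD maze 0 []).length : Int) - 1, y)]
      else acc) (pvCandX maze)

theorem pvA_eq (maze : List (List Int)) (start : Int × Int) :
    find_accessible_exit maze start
      = (pvCand maze).filter (fun e => decide (pvDfs maze start e ≠ [])) := by
  simp only [find_accessible_exit, pvCand, pvCandX]
  rw [PySem.List.foldl_append_ite_eq_filter]
  simp

-- A's candidate list = B's unconditional candidate list filtered by openness
theorem pvCand_eq_flat (maze : List (List Int)) :
    pvCand maze =
      ((PySem.List.pyRange 0 ((PySem.List.pyGetD maze 0 []).length : Int) 1).flatMap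
          (fun x => [(x, (0 : Int)), (x, (maze.length : Int) - 1)]) ++
        (PySem.List.pyRange 0 (maze.length : Int) 1).flatMap
          (fun y => [((0 : Int), y), (((PySem.List.pyGetD maze 0 []).length : Int) - 1, y)])
        ).filter (fun e => pvAt maze e == 0) := by
  have h1 : pvCandX maze =
      [] ++ ((PySem.List.pyRange 0 ((PySem.List.pyGetD maze 0 []).length : Int) 1).flatMap
        (fun x => [(x, (0 : Int)), (x, (maze.length : Int) - 1)])).filter
          (fun e => pvAt maze e == 0) :=
    pv_fold2_flat (fun e => pvAt maze e == 0)
      (fun x => (x, (0 : Int))) (fun x => (x, (maze.length : Int) - 1)) _ []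
  have h2 : pvCand maze =
      pvCandX maze ++ ((PySem.List.pyRange 0 (maze.length : Int) 1).flatMap
        (fun y => [((0 : Int), y), (((PySem.List.pyGetD maze 0 []).length : Int) - 1, y)])).filter
          (fun e => pvAt maze e == 0) :=
    pv_fold2_flat (fun e => pvAt maze e == 0)
      (fun y => ((0 : Int), y)) (fun y => (((PySem.List.pyGetD maze 0 []).length : Int) - 1, y)) _ _
  rw [h2, h1, List.filter_append]
  simp

theorem pvB_eq (maze : List (List Int)) (start : Int × Int) :
    find_accessible_exit_alt maze start
      = (pvCand maze).filter (fun e => (satLoop maze [start]).contains e) := by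
  show (_ : List (Int × Int)).filter
      (fun p => pvAt maze p == 0 && (satLoop maze [start]).contains p) = _
  rw [pv_filter_and (fun p => pvAt maze p == 0)
    (fun p => (satLoop maze [start]).contains p), ← pvCand_eq_flat]

-- ===== VERDICT (by name: the statement is the Claim_ definition above) =====
theorem find_accessible_exit_spec : Claim_equal_find_accessible_exit := by
  intro maze start _ _
  unfold Spec_find_accessible_exit
  rw [pvA_eq, pvB_eq]
  congr 1
  funext e
  rw [List.contains_eq_mem]
  exact decide_eq_decide.mpr ((pvDfs_ne_iff maze start e).trans (mem_sat_iff maze start e).symm)
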